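-- pv_equiv track=rewrite | github.com/sircinnamon/AoC2025 | 04/pt2-improved.py | get_adj_counts
-- ===== SOURCE A (Python) =====
-- def get_adj_counts(grid):
-- 	adj_counts = list()
-- 	d = len(grid)
-- 	for i in range(d):
-- 		adj_counts.append(list([0]*d))
-- 	for y, row in enumerate(grid):
-- 		for x, p in enumerate(row):
-- 			if(p=='@'):
-- 				if x>0: adj_counts[y][x-1]+=1
-- 				if x>0 and y>0: adj_counts[y-1][x-1]+=1
-- 				if y>0: adj_counts[y-1][x]+=1
-- 				if x<d-1 and y>0: adj_counts[y-1][x+1]+=1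
-- 				if x<d-1: adj_counts[y][x+1]+=1
-- 				if x<d-1 and y<d-1: adj_counts[y+1][x+1]+=1
-- 				if y<d-1: adj_counts[y+1][x]+=1
-- 				if x>0 and y<d-1: adj_counts[y+1][x-1]+=1
-- 			if(p=='.' or p=='X'):
-- 				adj_counts[y][x] += 1000
-- 	return adj_counts
-- ===== SOURCE B (Python) =====
-- def get_adj_counts(grid):
-- 	d = len(grid)
-- 	def is_at(ny, nx):
-- 		return 0 <= ny < d and 0 <= nx < len(grid[ny]) and grid[ny][nx] == '@'
-- 	out = []
-- 	for y in range(d):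
-- 		row_out = []
-- 		for x in range(d):
-- 			n = sum(1 for (ny, nx) in ((y, x+1), (y+1, x+1), (y+1, x), (y+1, x-1),
-- 						   (y, x-1), (y-1, x-1), (y-1, x), (y-1, x+1))
-- 				if is_at(ny, nx))
-- 			if x < len(grid[y]) and grid[y][x] in ('.', 'X'):
-- 				n += 1000
-- 			row_out.append(n)
-- 		out.append(row_out)
-- 	return out
-- ===== Notes on version B (the rewrite author's own statement) =====
-- stated objective: alternative
-- what changed: B computes each output cell by gathering: it counts '@' in the 8 length-guarded neighbour reads of that cell (plus the +1000 self term), instead of A's scatter that pre-builds a d x d zero matrix and has every '@' push +1 into its neighbours.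
import Mathlib
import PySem

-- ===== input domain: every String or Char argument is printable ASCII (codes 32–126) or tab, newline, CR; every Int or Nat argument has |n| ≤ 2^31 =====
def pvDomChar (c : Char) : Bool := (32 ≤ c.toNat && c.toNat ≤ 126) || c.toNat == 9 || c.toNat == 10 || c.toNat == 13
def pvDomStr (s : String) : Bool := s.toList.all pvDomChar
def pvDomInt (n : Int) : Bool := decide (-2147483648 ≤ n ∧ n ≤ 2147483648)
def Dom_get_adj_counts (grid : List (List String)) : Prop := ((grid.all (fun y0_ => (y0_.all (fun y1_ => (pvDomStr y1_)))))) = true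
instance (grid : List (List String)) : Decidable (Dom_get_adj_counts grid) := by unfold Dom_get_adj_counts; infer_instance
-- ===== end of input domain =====

-- B recomputes each output cell by GATHERING from its 8 neighbours instead of A's scatter of +1 from every '@';
-- same cost class (objective: alternative, no speed claim).

-- ===== PORT A =====
-- adj_counts[y][x] += δ  (indices are nonnegative at every call site, guarded by A's ifs)
def pvBump (m : List (List Int)) (y x : Int) (δ : Int) : List (List Int) :=
  m.modify y.toNat (fun r => r.modify x.toNat (· + δ))

-- the body of A's double loop for one cell (y, x) holding string p
def pvStepCell (d : Nat) (m : List (List Int)) (y x : Int) (p : String) : List (List Int) :=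
  let m1 :=
    if p = "@" then
      let a := if x > 0 then pvBump m y (x-1) 1 else m
      let a := if x > 0 ∧ y > 0 then pvBump a (y-1) (x-1) 1 else a
      let a := if y > 0 then pvBump a (y-1) x 1 else a
      let a := if x < (d:Int)-1 ∧ y > 0 then pvBump a (y-1) (x+1) 1 else a
      let a := if x < (d:Int)-1 then pvBump a y (x+1) 1 else a
      let a := if x < (d:Int)-1 ∧ y < (d:Int)-1 then pvBump a (y+1) (x+1) 1 else a
      let a := if y < (d:Int)-1 then pvBump a (y+1) x 1 else a
      let a := if x > 0 ∧ y < (d:Int)-1 then pvBump a (y+1) (x-1) 1 else a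
      a
    else m
  if p = "." ∨ p = "X" then pvBump m1 y x 1000 else m1

def get_adj_counts (grid : List (List String)) : List (List Int) :=
  let d := grid.length
  let adj := (List.range d).foldl (fun acc _ => acc ++ [List.replicate d (0:Int)]) []
  (PySem.List.enumerate grid).foldl
    (fun m yr => (PySem.List.enumerate yr.2).foldl (fun m2 xp => pvStepCell d m2 yr.1 xp.1 xp.2) m)
    adj

-- ===== PORT B =====
-- is_at(ny, nx): in-bounds (row-length-guarded) and cell is '@'
def pvIsAt (grid : List (List String)) (d : Nat) (ny nx : Int) : Bool :=
  decide (0 ≤ ny ∧ ny < (d:Int)) &&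
    (decide (0 ≤ nx ∧ nx < ((grid.getD ny.toNat []).length : Int)) &&
      ((grid.getD ny.toNat []).getD nx.toNat "" == "@"))

def get_adj_counts_alt (grid : List (List String)) : List (List Int) :=
  let d := grid.length
  (List.range d).map (fun (y : Nat) =>
    (List.range d).map (fun (x : Nat) =>
      let yi : Int := (y : Int)
      let xi : Int := (x : Int)
      let nbrs : List (Int × Int) :=
        [(yi, xi+1), (yi+1, xi+1), (yi+1, xi), (yi+1, xi-1),
         (yi, xi-1), (yi-1, xi-1), (yi-1, xi), (yi-1, xi+1)]
      let n := (nbrs.map (fun q => if pvIsAt grid d q.1 q.2 then (1:Int) else 0)).sum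
      let row := grid.getD y []
      if x < row.length ∧ ((row.getD x "" = ".") ∨ (row.getD x "" = "X")) then n + 1000 else n))

-- ===== PRECONDITION & SPEC =====
-- Pre_ excludes exactly the inputs on which the Python A raises IndexError: a ragged row reaching
-- beyond column d-1 whose cell there is '.', 'X', or an '@' other than at column d of a 1-row grid.
def Pre_get_adj_counts (grid : List (List String)) : Prop :=
  ∀ y < grid.length, ∀ x < (grid.getD y []).length, grid.length ≤ x →
    (grid.getD y []).getD x "" ≠ "." ∧ (grid.getD y []).getD x "" ≠ "X" ∧
    ((grid.getD y []).getD x "" = "@" → x = grid.length ∧ grid.length = 1)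
instance (grid : List (List String)) : Decidable (Pre_get_adj_counts grid) := by
  unfold Pre_get_adj_counts; exact Nat.decidableBallLT _ _

def pvWitness_get_adj_counts : List (List String) := [["@", "."], [".", "@"]]

def Spec_get_adj_counts (grid : List (List String)) (out : List (List Int)) : Prop :=
  out = get_adj_counts_alt grid
instance (grid : List (List String)) (out : List (List Int)) : Decidable (Spec_get_adj_counts grid out) := by
  unfold Spec_get_adj_counts; infer_instance

-- ===== CLAIM (what is proved, stated in full; the proofs are below) =====
def Claim_equal_get_adj_counts : Prop :=
  ∀ (grid : List (List String)), Dom_get_adj_counts grid → Pre_get_adj_counts grid →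
    Spec_get_adj_counts grid (get_adj_counts grid)

-- ===== LEMMAS AND PROOFS =====

def pvG2 (m : List (List Int)) (Y X : Nat) : Int := (m.getD Y []).getD X 0

def pvShp (d : Nat) (m : List (List Int)) : Prop :=
  m.length = d ∧ ∀ Y < d, (m.getD Y []).length = d

theorem pvGetD_modify {α : Type} (l : List α) (i Y : Nat) (f : α → α) (dflt : α) :
    (l.modify i f).getD Y dflt = if i = Y ∧ Y < l.length then f (l.getD Y dflt) else l.getD Y dflt := by
  rcases Nat.lt_or_ge Y l.length with h | h
  · rw [List.getD_eq_getElem?_getD, List.getD_eq_getElem?_getD, List.getElem?_modify,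
      List.getElem?_eq_getElem h]
    by_cases hi : i = Y <;> simp [hi, h]
  · have h2 : (l.modify i f).length ≤ Y := by simpa [List.length_modify] using h
    rw [List.getD_eq_getElem?_getD, List.getD_eq_getElem?_getD, List.getElem?_eq_none_iff.2 h,
      List.getElem?_eq_none_iff.2 h2, if_neg (by omega : ¬ (i = Y ∧ Y < l.length))]

theorem pvShp_bump {d : Nat} {m : List (List Int)} (h : pvShp d m) (y x δ : Int) :
    pvShp d (pvBump m y x δ) := by
  obtain ⟨h1, h2⟩ := h
  constructor
  · simpa [pvBump, List.length_modify] using h1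
  · intro Y hY
    rw [pvBump, pvGetD_modify]
    split_ifs with hc
    · rw [List.length_modify]; exact h2 Y hY
    · exact h2 Y hY

theorem pvG2_bump {d : Nat} {m : List (List Int)} (hm : pvShp d m) (y x : Int) (δ : Int)
    (hy : 0 ≤ y) (hx : 0 ≤ x) (Y X : Nat) :
    pvG2 (pvBump m y x δ) Y X =
      pvG2 m Y X + (if (Y:Int) = y ∧ (X:Int) = x ∧ Y < d ∧ X < d then δ else 0) := by
  obtain ⟨h1, h2⟩ := hm
  rw [pvG2, pvG2, pvBump, pvGetD_modify]
  rcases Nat.lt_or_ge Y d with hY | hY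
  · have hrl : (m.getD Y []).length = d := h2 Y hY
    split_ifs with hc hb hb <;>
      first
        | omega
        | (simp only [pvGetD_modify]; split_ifs <;> omega)
  · split_ifs <;> omega

theorem pvShp_ite {d : Nat} {m : List (List Int)} (c : Prop) [Decidable c] (h : pvShp d m)
    (y x δ : Int) : pvShp d (if c then pvBump m y x δ else m) := by
  split_ifs
  · exact pvShp_bump h y x δ
  · exact h

theorem pvShp_iteM {d : Nat} {m1 m2 : List (List Int)} (c : Prop) [Decidable c]
    (h1 : pvShp d m1) (h2 : pvShp d m2) : pvShp d (if c then m1 else m2) := by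
  split <;> assumption

theorem pvShp_stepCell {d : Nat} {m : List (List Int)} (h : pvShp d m) (y x : Int) (p : String) :
    pvShp d (pvStepCell d m y x p) := by
  unfold pvStepCell
  dsimp only
  exact pvShp_ite _ (pvShp_iteM _
    (pvShp_ite _ (pvShp_ite _ (pvShp_ite _ (pvShp_ite _ (pvShp_ite _ (pvShp_ite _ (pvShp_ite _
      (pvShp_ite _ h _ _ _) _ _ _) _ _ _) _ _ _) _ _ _) _ _ _) _ _ _) _ _ _) h) _ _ _

theorem pvG2_condBump {d : Nat} {m : List (List Int)} (hm : pvShp d m) (c : Prop) [Decidable c]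
    (y x : Int) (δ : Int) (hyx : c → 0 ≤ y ∧ 0 ≤ x) (Y X : Nat) :
    pvG2 (if c then pvBump m y x δ else m) Y X =
      pvG2 m Y X + (if c ∧ (Y:Int) = y ∧ (X:Int) = x ∧ Y < d ∧ X < d then δ else 0) := by
  by_cases hc : c
  · rw [if_pos hc, pvG2_bump hm y x δ (hyx hc).1 (hyx hc).2 Y X]
    by_cases hb : (Y:Int) = y ∧ (X:Int) = x ∧ Y < d ∧ X < d
    · rw [if_pos hb, if_pos ⟨hc, hb⟩]
    · rw [if_neg hb, if_neg (by tauto)]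
  · rw [if_neg hc, if_neg (by tauto), add_zero]

def pvContrib (d : Nat) (y x : Int) (p : String) (Y X : Nat) : Int :=
  (if (p = "@" ∧ x > 0) ∧ (Y:Int) = y ∧ (X:Int) = x-1 ∧ Y < d ∧ X < d then 1 else 0) +
  (if (p = "@" ∧ x > 0 ∧ y > 0) ∧ (Y:Int) = y-1 ∧ (X:Int) = x-1 ∧ Y < d ∧ X < d then 1 else 0) +
  (if (p = "@" ∧ y > 0) ∧ (Y:Int) = y-1 ∧ (X:Int) = x ∧ Y < d ∧ X < d then 1 else 0) +
  (if (p = "@" ∧ x < (d:Int)-1 ∧ y > 0) ∧ (Y:Int) = y-1 ∧ (X:Int) = x+1 ∧ Y < d ∧ X < d then 1 else 0) +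
  (if (p = "@" ∧ x < (d:Int)-1) ∧ (Y:Int) = y ∧ (X:Int) = x+1 ∧ Y < d ∧ X < d then 1 else 0) +
  (if (p = "@" ∧ x < (d:Int)-1 ∧ y < (d:Int)-1) ∧ (Y:Int) = y+1 ∧ (X:Int) = x+1 ∧ Y < d ∧ X < d then 1 else 0) +
  (if (p = "@" ∧ y < (d:Int)-1) ∧ (Y:Int) = y+1 ∧ (X:Int) = x ∧ Y < d ∧ X < d then 1 else 0) +
  (if (p = "@" ∧ x > 0 ∧ y < (d:Int)-1) ∧ (Y:Int) = y+1 ∧ (X:Int) = x-1 ∧ Y < d ∧ X < d then 1 else 0) +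
  (if (p = "." ∨ p = "X") ∧ (Y:Int) = y ∧ (X:Int) = x ∧ Y < d ∧ X < d then 1000 else 0)

theorem pvG2_stepCell {d : Nat} {m : List (List Int)} (hm : pvShp d m) (y x : Int) (p : String)
    (hy : 0 ≤ y) (hx : 0 ≤ x) (Y X : Nat) :
    pvG2 (pvStepCell d m y x p) Y X = pvG2 m Y X + pvContrib d y x p Y X := by
  unfold pvStepCell
  dsimp only
  by_cases hp : p = "@"
  · simp only [if_pos hp]
    have s1 := pvShp_ite (x > 0) hm y (x-1) 1
    have s2 := pvShp_ite (x > 0 ∧ y > 0) s1 (y-1) (x-1) 1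
    have s3 := pvShp_ite (y > 0) s2 (y-1) x 1
    have s4 := pvShp_ite (x < (d:Int)-1 ∧ y > 0) s3 (y-1) (x+1) 1
    have s5 := pvShp_ite (x < (d:Int)-1) s4 y (x+1) 1
    have s6 := pvShp_ite (x < (d:Int)-1 ∧ y < (d:Int)-1) s5 (y+1) (x+1) 1
    have s7 := pvShp_ite (y < (d:Int)-1) s6 (y+1) x 1
    have s8 := pvShp_ite (x > 0 ∧ y < (d:Int)-1) s7 (y+1) (x-1) 1
    rw [pvG2_condBump s8 (p = "." ∨ p = "X") y x 1000 (fun _ => ⟨hy, hx⟩) Y X,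
        pvG2_condBump s7 (x > 0 ∧ y < (d:Int)-1) (y+1) (x-1) 1 (fun hc => ⟨by omega, by omega⟩) Y X,
        pvG2_condBump s6 (y < (d:Int)-1) (y+1) x 1 (fun _ => ⟨by omega, hx⟩) Y X,
        pvG2_condBump s5 (x < (d:Int)-1 ∧ y < (d:Int)-1) (y+1) (x+1) 1 (fun _ => ⟨by omega, by omega⟩) Y X,
        pvG2_condBump s4 (x < (d:Int)-1) y (x+1) 1 (fun _ => ⟨hy, by omega⟩) Y X,
        pvG2_condBump s3 (x < (d:Int)-1 ∧ y > 0) (y-1) (x+1) 1 (fun hc => ⟨by omega, by omega⟩) Y X,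
        pvG2_condBump s2 (y > 0) (y-1) x 1 (fun hc => ⟨by omega, hx⟩) Y X,
        pvG2_condBump s1 (x > 0 ∧ y > 0) (y-1) (x-1) 1 (fun hc => ⟨by omega, by omega⟩) Y X,
        pvG2_condBump hm (x > 0) y (x-1) 1 (fun hc => ⟨hy, by omega⟩) Y X]
    simp only [pvContrib, hp, true_and]
    ring
  · simp only [if_neg hp]
    rw [pvG2_condBump hm (p = "." ∨ p = "X") y x 1000 (fun _ => ⟨hy, hx⟩) Y X]
    simp only [pvContrib, hp, false_and, if_false]
    ring

def pvCellList (grid : List (List String)) : List (Int × Int × String) :=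
  (PySem.List.enumerate grid).flatMap
    (fun yr => (PySem.List.enumerate yr.2).map (fun xp => (yr.1, xp.1, xp.2)))

theorem pvFold_eq_cells (d : Nat) (grid : List (List String)) (adj : List (List Int)) :
    (PySem.List.enumerate grid).foldl
      (fun m yr => (PySem.List.enumerate yr.2).foldl (fun m2 xp => pvStepCell d m2 yr.1 xp.1 xp.2) m)
      adj
    = (pvCellList grid).foldl (fun m c => pvStepCell d m c.1 c.2.1 c.2.2) adj := by
  rw [pvCellList, List.foldl_flatMap]
  simp only [List.foldl_map]

theorem pvShp_foldCells {d : Nat} (cs : List (Int × Int × String)) {m : List (List Int)}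
    (hm : pvShp d m) : pvShp d (cs.foldl (fun m c => pvStepCell d m c.1 c.2.1 c.2.2) m) := by
  induction cs generalizing m with
  | nil => exact hm
  | cons c cs ih => exact ih (pvShp_stepCell hm c.1 c.2.1 c.2.2)

theorem pvG2_foldCells {d : Nat} (cs : List (Int × Int × String)) {m : List (List Int)}
    (hm : pvShp d m) (hnn : ∀ c ∈ cs, 0 ≤ c.1 ∧ 0 ≤ c.2.1) (Y X : Nat) :
    pvG2 (cs.foldl (fun m c => pvStepCell d m c.1 c.2.1 c.2.2) m) Y X
      = pvG2 m Y X + (cs.map (fun c => pvContrib d c.1 c.2.1 c.2.2 Y X)).sum := by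
  induction cs generalizing m with
  | nil => simp
  | cons c cs ih =>
    have hc := hnn c (List.mem_cons_self)
    rw [List.foldl_cons, ih (pvShp_stepCell hm c.1 c.2.1 c.2.2) (fun c hmem => hnn c (List.mem_cons_of_mem _ hmem)),
      pvG2_stepCell hm c.1 c.2.1 c.2.2 hc.1 hc.2 Y X, List.map_cons, List.sum_cons]
    ring

theorem pvCellList_nonneg (grid : List (List String)) :
    ∀ c ∈ pvCellList grid, 0 ≤ c.1 ∧ 0 ≤ c.2.1 := by
  intro c hc
  rw [pvCellList, List.mem_flatMap] at hc
  obtain ⟨yr, hyr, hc⟩ := hc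
  rw [List.mem_map] at hc
  obtain ⟨xp, hxp, rfl⟩ := hc
  rw [PySem.List.mem_enumerate_iff] at hyr hxp
  obtain ⟨k, hk, rfl⟩ := hyr
  obtain ⟨j, hj, rfl⟩ := hxp
  constructor <;> simp <;> omega

theorem pvAdjInit (d : Nat) :
    (List.range d).foldl (fun acc _ => acc ++ [List.replicate d (0:Int)]) []
      = List.replicate d (List.replicate d 0) := by
  rw [PySem.List.foldl_append_singleton_eq_map]
  simp [List.map_const', List.eq_replicate_iff]

theorem pvShp_init (d : Nat) : pvShp d (List.replicate d (List.replicate d (0:Int))) := by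
  constructor
  · simp
  · intro Y hY
    rw [List.getD_eq_getElem?_getD, List.getElem?_replicate, if_pos hY]
    simp

theorem pvG2_init (d : Nat) (Y X : Nat) :
    pvG2 (List.replicate d (List.replicate d (0:Int))) Y X = 0 := by
  simp only [pvG2, List.getD_eq_getElem?_getD, List.getElem?_replicate]
  split_ifs <;> simp

theorem pvSum_enum_pin {α : Type} (l : List α) (s b : Int) (F : α → Int) (dflt : α) :
    ((PySem.List.enumerate l s).map (fun c => if c.1 = b then F c.2 else 0)).sum
    = if s ≤ b ∧ b < s + l.length then F (l.getD (b - s).toNat dflt) else 0 := by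
  induction l generalizing s with
  | nil =>
    rw [if_neg (by simp only [List.length_nil, List.length_cons]; push_cast; omega)]
    simp [PySem.List.enumerate_nil]
  | cons a l ih =>
    rw [PySem.List.enumerate_cons, List.map_cons, List.sum_cons, ih (s+1)]
    by_cases hb : s = b
    · rw [if_pos hb, if_neg (by push_cast; omega), if_pos (by simp only [List.length_nil, List.length_cons]; push_cast; omega)]
      have h0 : (b - s).toNat = 0 := by omega
      rw [h0, add_zero, List.getD_cons_zero]
    · rw [if_neg hb, zero_add]
      by_cases hc : s + 1 ≤ b ∧ b < s + 1 + l.length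
      · rw [if_pos hc, if_pos (by simp only [List.length_nil, List.length_cons] at hc ⊢; push_cast at hc ⊢; omega)]
        have h1 : (b - s).toNat = (b - (s+1)).toNat + 1 := by omega
        rw [h1, List.getD_cons_succ]
      · rw [if_neg hc, if_neg (by simp only [List.length_nil, List.length_cons] at hc ⊢; push_cast at hc ⊢; omega)]

theorem pvSum_flatMap {α : Type} (l : List α) (f : α → List Int) :
    (l.flatMap f).sum = (l.map (fun a => (f a).sum)).sum := by
  induction l with
  | nil => simp
  | cons a l ih => simp [List.flatMap_cons, List.sum_append, ih]

theorem pvSum_cells_pin (grid : List (List String)) (a b : Int) (Q : String → Prop)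
    [DecidablePred Q] (v : Int) :
    ((pvCellList grid).map (fun c => if c.1 = a ∧ c.2.1 = b ∧ Q c.2.2 then v else 0)).sum
    = if 0 ≤ a ∧ a < grid.length ∧ 0 ≤ b ∧ b < (grid.getD a.toNat []).length ∧
        Q ((grid.getD a.toNat []).getD b.toNat "") then v else 0 := by
  rw [pvCellList, List.map_flatMap]
  have hstep : ∀ yr : Int × List String,
      ((List.map (fun xp : Int × String => (yr.1, xp.1, xp.2)) (PySem.List.enumerate yr.2)).map
        (fun c : Int × Int × String => if c.1 = a ∧ c.2.1 = b ∧ Q c.2.2 then v else 0)).sum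
      = if yr.1 = a then
          (if 0 ≤ b ∧ b < (yr.2).length ∧ Q ((yr.2).getD b.toNat "") then v else 0) else 0 := by
    intro yr
    rw [List.map_map]
    have hfn : ((fun c : Int × Int × String => if c.1 = a ∧ c.2.1 = b ∧ Q c.2.2 then v else 0) ∘
        (fun xp : Int × String => (yr.1, xp.1, xp.2)))
        = (fun xp : Int × String =>
            if xp.1 = b then (if yr.1 = a ∧ Q xp.2 then v else 0) else 0) := by
      funext xp
      simp only [Function.comp]
      split_ifs <;> first | rfl | tauto
    rw [hfn, pvSum_enum_pin yr.2 0 b (fun t => if yr.1 = a ∧ Q t then v else 0) ""]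
    by_cases h1 : 0 ≤ b ∧ b < 0 + (yr.2).length
    · rw [if_pos h1]
      have hb0 : b - 0 = b := by ring
      rw [hb0]
      split_ifs <;> first | rfl | tauto | (exfalso; omega) | (simp at *; tauto)
    · rw [if_neg h1]
      split_ifs <;> first | rfl | (exfalso; omega) | (simp at *; omega)
  rw [pvSum_flatMap]
  simp only [hstep]
  rw [pvSum_enum_pin grid 0 a
    (fun r => if 0 ≤ b ∧ b < (r.length : Int) ∧ Q (r.getD b.toNat "") then v else 0) []]
  have ha0 : a - 0 = a := sub_zero a
  rw [ha0, zero_add]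
  split_ifs <;> first | rfl | tauto

theorem pvAddIf (c : Prop) [Decidable c] (n v : Int) :
    (if c then n + v else n) = n + (if c then v else 0) := by
  split_ifs <;> ring

theorem pvIsAt_ind (grid : List (List String)) (a b : Int) :
    (if pvIsAt grid grid.length a b then (1:Int) else 0)
    = (if 0 ≤ a ∧ a < (grid.length:Int) ∧ 0 ≤ b ∧ b < ((grid.getD a.toNat []).length:Int) ∧
        (grid.getD a.toNat []).getD b.toNat "" = "@" then (1:Int) else 0) := by
  simp only [pvIsAt, Bool.and_eq_true, decide_eq_true_eq, beq_iff_eq]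
  split_ifs <;> tauto

theorem pvCell (grid : List (List String)) (Y X : Nat)
    (hY : Y < grid.length) (hX : X < grid.length) :
    pvG2 (get_adj_counts grid) Y X =
      (if X < (grid.getD Y []).length ∧
          ((grid.getD Y []).getD X "" = "." ∨ (grid.getD Y []).getD X "" = "X") then
        (List.map (fun q : Int × Int => if pvIsAt grid grid.length q.1 q.2 then (1:Int) else 0)
          [((Y:Int), (X:Int)+1), ((Y:Int)+1, (X:Int)+1), ((Y:Int)+1, (X:Int)), ((Y:Int)+1, (X:Int)-1),
           ((Y:Int), (X:Int)-1), ((Y:Int)-1, (X:Int)-1), ((Y:Int)-1, (X:Int)), ((Y:Int)-1, (X:Int)+1)]).sum + 1000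
      else
        (List.map (fun q : Int × Int => if pvIsAt grid grid.length q.1 q.2 then (1:Int) else 0)
          [((Y:Int), (X:Int)+1), ((Y:Int)+1, (X:Int)+1), ((Y:Int)+1, (X:Int)), ((Y:Int)+1, (X:Int)-1),
           ((Y:Int), (X:Int)-1), ((Y:Int)-1, (X:Int)-1), ((Y:Int)-1, (X:Int)), ((Y:Int)-1, (X:Int)+1)]).sum) := by
  rw [get_adj_counts]
  rw [pvAdjInit, pvFold_eq_cells,
    pvG2_foldCells (pvCellList grid) (pvShp_init grid.length) (pvCellList_nonneg grid) Y X,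
    pvG2_init, zero_add]
  simp only [pvContrib]
  simp only [PySem.List.sum_map_add_int]
  have E1 : (List.map (fun c : Int × Int × String =>
      if (c.2.2 = "@" ∧ c.2.1 > 0) ∧ (Y:Int) = c.1 ∧ (X:Int) = c.2.1 - 1 ∧ Y < grid.length ∧ X < grid.length then (1:Int) else 0)
      (pvCellList grid)).sum = (if 0 ≤ ((Y:Int)) ∧ ((Y:Int)) < (grid.length:Int) ∧ 0 ≤ ((X:Int)+1) ∧ ((X:Int)+1) < ((grid.getD ((Y:Int)).toNat []).length:Int) ∧ (grid.getD ((Y:Int)).toNat []).getD ((X:Int)+1).toNat "" = "@" then (1:Int) else 0) := by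
    rw [show (fun c : Int × Int × String =>
        if (c.2.2 = "@" ∧ c.2.1 > 0) ∧ (Y:Int) = c.1 ∧ (X:Int) = c.2.1 - 1 ∧ Y < grid.length ∧ X < grid.length then (1:Int) else 0)
        = (fun c : Int × Int × String =>
        if c.1 = ((Y:Int)) ∧ c.2.1 = ((X:Int)+1) ∧ c.2.2 = "@" then (1:Int) else 0) from
      funext fun c => if_congr
        ⟨fun ⟨hg, h1, h2, h3, h4⟩ => ⟨by omega, by omega, hg.1⟩,
         fun ⟨h1, h2, hp⟩ => ⟨⟨hp, by omega⟩, by omega, by omega, hY, hX⟩⟩ rfl rfl]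
    exact pvSum_cells_pin grid ((Y:Int)) ((X:Int)+1) (fun p => p = "@") 1
  have E2 : (List.map (fun c : Int × Int × String =>
      if (c.2.2 = "@" ∧ c.2.1 > 0 ∧ c.1 > 0) ∧ (Y:Int) = c.1 - 1 ∧ (X:Int) = c.2.1 - 1 ∧ Y < grid.length ∧ X < grid.length then (1:Int) else 0)
      (pvCellList grid)).sum = (if 0 ≤ ((Y:Int)+1) ∧ ((Y:Int)+1) < (grid.length:Int) ∧ 0 ≤ ((X:Int)+1) ∧ ((X:Int)+1) < ((grid.getD ((Y:Int)+1).toNat []).length:Int) ∧ (grid.getD ((Y:Int)+1).toNat []).getD ((X:Int)+1).toNat "" = "@" then (1:Int) else 0) := by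
    rw [show (fun c : Int × Int × String =>
        if (c.2.2 = "@" ∧ c.2.1 > 0 ∧ c.1 > 0) ∧ (Y:Int) = c.1 - 1 ∧ (X:Int) = c.2.1 - 1 ∧ Y < grid.length ∧ X < grid.length then (1:Int) else 0)
        = (fun c : Int × Int × String =>
        if c.1 = ((Y:Int)+1) ∧ c.2.1 = ((X:Int)+1) ∧ c.2.2 = "@" then (1:Int) else 0) from
      funext fun c => if_congr
        ⟨fun ⟨hg, h1, h2, h3, h4⟩ => ⟨by omega, by omega, hg.1⟩,
         fun ⟨h1, h2, hp⟩ => ⟨⟨hp, by omega⟩, by omega, by omega, hY, hX⟩⟩ rfl rfl]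
    exact pvSum_cells_pin grid ((Y:Int)+1) ((X:Int)+1) (fun p => p = "@") 1
  have E3 : (List.map (fun c : Int × Int × String =>
      if (c.2.2 = "@" ∧ c.1 > 0) ∧ (Y:Int) = c.1 - 1 ∧ (X:Int) = c.2.1 ∧ Y < grid.length ∧ X < grid.length then (1:Int) else 0)
      (pvCellList grid)).sum = (if 0 ≤ ((Y:Int)+1) ∧ ((Y:Int)+1) < (grid.length:Int) ∧ 0 ≤ ((X:Int)) ∧ ((X:Int)) < ((grid.getD ((Y:Int)+1).toNat []).length:Int) ∧ (grid.getD ((Y:Int)+1).toNat []).getD ((X:Int)).toNat "" = "@" then (1:Int) else 0) := by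
    rw [show (fun c : Int × Int × String =>
        if (c.2.2 = "@" ∧ c.1 > 0) ∧ (Y:Int) = c.1 - 1 ∧ (X:Int) = c.2.1 ∧ Y < grid.length ∧ X < grid.length then (1:Int) else 0)
        = (fun c : Int × Int × String =>
        if c.1 = ((Y:Int)+1) ∧ c.2.1 = ((X:Int)) ∧ c.2.2 = "@" then (1:Int) else 0) from
      funext fun c => if_congr
        ⟨fun ⟨hg, h1, h2, h3, h4⟩ => ⟨by omega, by omega, hg.1⟩,
         fun ⟨h1, h2, hp⟩ => ⟨⟨hp, by omega⟩, by omega, by omega, hY, hX⟩⟩ rfl rfl]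
    exact pvSum_cells_pin grid ((Y:Int)+1) ((X:Int)) (fun p => p = "@") 1
  have E4 : (List.map (fun c : Int × Int × String =>
      if (c.2.2 = "@" ∧ c.2.1 < (grid.length:Int) - 1 ∧ c.1 > 0) ∧ (Y:Int) = c.1 - 1 ∧ (X:Int) = c.2.1 + 1 ∧ Y < grid.length ∧ X < grid.length then (1:Int) else 0)
      (pvCellList grid)).sum = (if 0 ≤ ((Y:Int)+1) ∧ ((Y:Int)+1) < (grid.length:Int) ∧ 0 ≤ ((X:Int)-1) ∧ ((X:Int)-1) < ((grid.getD ((Y:Int)+1).toNat []).length:Int) ∧ (grid.getD ((Y:Int)+1).toNat []).getD ((X:Int)-1).toNat "" = "@" then (1:Int) else 0) := by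
    rw [show (fun c : Int × Int × String =>
        if (c.2.2 = "@" ∧ c.2.1 < (grid.length:Int) - 1 ∧ c.1 > 0) ∧ (Y:Int) = c.1 - 1 ∧ (X:Int) = c.2.1 + 1 ∧ Y < grid.length ∧ X < grid.length then (1:Int) else 0)
        = (fun c : Int × Int × String =>
        if c.1 = ((Y:Int)+1) ∧ c.2.1 = ((X:Int)-1) ∧ c.2.2 = "@" then (1:Int) else 0) from
      funext fun c => if_congr
        ⟨fun ⟨hg, h1, h2, h3, h4⟩ => ⟨by omega, by omega, hg.1⟩,
         fun ⟨h1, h2, hp⟩ => ⟨⟨hp, by omega⟩, by omega, by omega, hY, hX⟩⟩ rfl rfl]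
    exact pvSum_cells_pin grid ((Y:Int)+1) ((X:Int)-1) (fun p => p = "@") 1
  have E5 : (List.map (fun c : Int × Int × String =>
      if (c.2.2 = "@" ∧ c.2.1 < (grid.length:Int) - 1) ∧ (Y:Int) = c.1 ∧ (X:Int) = c.2.1 + 1 ∧ Y < grid.length ∧ X < grid.length then (1:Int) else 0)
      (pvCellList grid)).sum = (if 0 ≤ ((Y:Int)) ∧ ((Y:Int)) < (grid.length:Int) ∧ 0 ≤ ((X:Int)-1) ∧ ((X:Int)-1) < ((grid.getD ((Y:Int)).toNat []).length:Int) ∧ (grid.getD ((Y:Int)).toNat []).getD ((X:Int)-1).toNat "" = "@" then (1:Int) else 0) := by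
    rw [show (fun c : Int × Int × String =>
        if (c.2.2 = "@" ∧ c.2.1 < (grid.length:Int) - 1) ∧ (Y:Int) = c.1 ∧ (X:Int) = c.2.1 + 1 ∧ Y < grid.length ∧ X < grid.length then (1:Int) else 0)
        = (fun c : Int × Int × String =>
        if c.1 = ((Y:Int)) ∧ c.2.1 = ((X:Int)-1) ∧ c.2.2 = "@" then (1:Int) else 0) from
      funext fun c => if_congr
        ⟨fun ⟨hg, h1, h2, h3, h4⟩ => ⟨by omega, by omega, hg.1⟩,
         fun ⟨h1, h2, hp⟩ => ⟨⟨hp, by omega⟩, by omega, by omega, hY, hX⟩⟩ rfl rfl]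
    exact pvSum_cells_pin grid ((Y:Int)) ((X:Int)-1) (fun p => p = "@") 1
  have E6 : (List.map (fun c : Int × Int × String =>
      if (c.2.2 = "@" ∧ c.2.1 < (grid.length:Int) - 1 ∧ c.1 < (grid.length:Int) - 1) ∧ (Y:Int) = c.1 + 1 ∧ (X:Int) = c.2.1 + 1 ∧ Y < grid.length ∧ X < grid.length then (1:Int) else 0)
      (pvCellList grid)).sum = (if 0 ≤ ((Y:Int)-1) ∧ ((Y:Int)-1) < (grid.length:Int) ∧ 0 ≤ ((X:Int)-1) ∧ ((X:Int)-1) < ((grid.getD ((Y:Int)-1).toNat []).length:Int) ∧ (grid.getD ((Y:Int)-1).toNat []).getD ((X:Int)-1).toNat "" = "@" then (1:Int) else 0) := by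
    rw [show (fun c : Int × Int × String =>
        if (c.2.2 = "@" ∧ c.2.1 < (grid.length:Int) - 1 ∧ c.1 < (grid.length:Int) - 1) ∧ (Y:Int) = c.1 + 1 ∧ (X:Int) = c.2.1 + 1 ∧ Y < grid.length ∧ X < grid.length then (1:Int) else 0)
        = (fun c : Int × Int × String =>
        if c.1 = ((Y:Int)-1) ∧ c.2.1 = ((X:Int)-1) ∧ c.2.2 = "@" then (1:Int) else 0) from
      funext fun c => if_congr
        ⟨fun ⟨hg, h1, h2, h3, h4⟩ => ⟨by omega, by omega, hg.1⟩,
         fun ⟨h1, h2, hp⟩ => ⟨⟨hp, by omega⟩, by omega, by omega, hY, hX⟩⟩ rfl rfl]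
    exact pvSum_cells_pin grid ((Y:Int)-1) ((X:Int)-1) (fun p => p = "@") 1
  have E7 : (List.map (fun c : Int × Int × String =>
      if (c.2.2 = "@" ∧ c.1 < (grid.length:Int) - 1) ∧ (Y:Int) = c.1 + 1 ∧ (X:Int) = c.2.1 ∧ Y < grid.length ∧ X < grid.length then (1:Int) else 0)
      (pvCellList grid)).sum = (if 0 ≤ ((Y:Int)-1) ∧ ((Y:Int)-1) < (grid.length:Int) ∧ 0 ≤ ((X:Int)) ∧ ((X:Int)) < ((grid.getD ((Y:Int)-1).toNat []).length:Int) ∧ (grid.getD ((Y:Int)-1).toNat []).getD ((X:Int)).toNat "" = "@" then (1:Int) else 0) := by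
    rw [show (fun c : Int × Int × String =>
        if (c.2.2 = "@" ∧ c.1 < (grid.length:Int) - 1) ∧ (Y:Int) = c.1 + 1 ∧ (X:Int) = c.2.1 ∧ Y < grid.length ∧ X < grid.length then (1:Int) else 0)
        = (fun c : Int × Int × String =>
        if c.1 = ((Y:Int)-1) ∧ c.2.1 = ((X:Int)) ∧ c.2.2 = "@" then (1:Int) else 0) from
      funext fun c => if_congr
        ⟨fun ⟨hg, h1, h2, h3, h4⟩ => ⟨by omega, by omega, hg.1⟩,
         fun ⟨h1, h2, hp⟩ => ⟨⟨hp, by omega⟩, by omega, by omega, hY, hX⟩⟩ rfl rfl]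
    exact pvSum_cells_pin grid ((Y:Int)-1) ((X:Int)) (fun p => p = "@") 1
  have E8 : (List.map (fun c : Int × Int × String =>
      if (c.2.2 = "@" ∧ c.2.1 > 0 ∧ c.1 < (grid.length:Int) - 1) ∧ (Y:Int) = c.1 + 1 ∧ (X:Int) = c.2.1 - 1 ∧ Y < grid.length ∧ X < grid.length then (1:Int) else 0)
      (pvCellList grid)).sum = (if 0 ≤ ((Y:Int)-1) ∧ ((Y:Int)-1) < (grid.length:Int) ∧ 0 ≤ ((X:Int)+1) ∧ ((X:Int)+1) < ((grid.getD ((Y:Int)-1).toNat []).length:Int) ∧ (grid.getD ((Y:Int)-1).toNat []).getD ((X:Int)+1).toNat "" = "@" then (1:Int) else 0) := by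
    rw [show (fun c : Int × Int × String =>
        if (c.2.2 = "@" ∧ c.2.1 > 0 ∧ c.1 < (grid.length:Int) - 1) ∧ (Y:Int) = c.1 + 1 ∧ (X:Int) = c.2.1 - 1 ∧ Y < grid.length ∧ X < grid.length then (1:Int) else 0)
        = (fun c : Int × Int × String =>
        if c.1 = ((Y:Int)-1) ∧ c.2.1 = ((X:Int)+1) ∧ c.2.2 = "@" then (1:Int) else 0) from
      funext fun c => if_congr
        ⟨fun ⟨hg, h1, h2, h3, h4⟩ => ⟨by omega, by omega, hg.1⟩,
         fun ⟨h1, h2, hp⟩ => ⟨⟨hp, by omega⟩, by omega, by omega, hY, hX⟩⟩ rfl rfl]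
    exact pvSum_cells_pin grid ((Y:Int)-1) ((X:Int)+1) (fun p => p = "@") 1
  have E9 : (List.map (fun c : Int × Int × String =>
      if (c.2.2 = "." ∨ c.2.2 = "X") ∧ (Y:Int) = c.1 ∧ (X:Int) = c.2.1 ∧ Y < grid.length ∧ X < grid.length then (1000:Int) else 0)
      (pvCellList grid)).sum = (if 0 ≤ ((Y:Int)) ∧ ((Y:Int)) < (grid.length:Int) ∧ 0 ≤ ((X:Int)) ∧ ((X:Int)) < ((grid.getD ((Y:Int)).toNat []).length:Int) ∧ ((grid.getD ((Y:Int)).toNat []).getD ((X:Int)).toNat "" = "." ∨ (grid.getD ((Y:Int)).toNat []).getD ((X:Int)).toNat "" = "X") then (1000:Int) else 0) := by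
    rw [show (fun c : Int × Int × String =>
        if (c.2.2 = "." ∨ c.2.2 = "X") ∧ (Y:Int) = c.1 ∧ (X:Int) = c.2.1 ∧ Y < grid.length ∧ X < grid.length then (1000:Int) else 0)
        = (fun c : Int × Int × String =>
        if c.1 = ((Y:Int)) ∧ c.2.1 = ((X:Int)) ∧ (c.2.2 = "." ∨ c.2.2 = "X") then (1000:Int) else 0) from
      funext fun c => if_congr
        ⟨fun ⟨hq, h1, h2, h3, h4⟩ => ⟨by omega, by omega, hq⟩,
         fun ⟨h1, h2, hq⟩ => ⟨hq, by omega, by omega, hY, hX⟩⟩ rfl rfl]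
    exact pvSum_cells_pin grid ((Y:Int)) ((X:Int)) (fun p => p = "." ∨ p = "X") 1000
  rw [E1, E2, E3, E4, E5, E6, E7, E8, E9, pvAddIf]
  simp only [List.map_cons, List.map_nil, List.sum_cons, List.sum_nil]
  simp only [pvIsAt_ind]
  have hself : (if X < (grid.getD Y []).length ∧
        ((grid.getD Y []).getD X "" = "." ∨ (grid.getD Y []).getD X "" = "X") then (1000:Int) else 0)
      = (if 0 ≤ ((Y:Int)) ∧ ((Y:Int)) < (grid.length:Int) ∧ 0 ≤ ((X:Int)) ∧ ((X:Int)) < ((grid.getD ((Y:Int)).toNat []).length:Int) ∧ ((grid.getD ((Y:Int)).toNat []).getD ((X:Int)).toNat "" = "." ∨ (grid.getD ((Y:Int)).toNat []).getD ((X:Int)).toNat "" = "X") then (1000:Int) else 0) := by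
    apply if_congr _ rfl rfl
    rw [Int.toNat_natCast, Int.toNat_natCast]
    constructor
    · rintro ⟨h1, h2⟩
      exact ⟨by omega, by omega, by omega, by omega, h2⟩
    · rintro ⟨h1, h2, h3, h4, h5⟩
      exact ⟨by omega, h5⟩
  rw [hself]
  ring

theorem pvTab {d : Nat} {m : List (List Int)} (hm : pvShp d m) :
    m = (List.range d).map (fun Y => (List.range d).map (fun X => pvG2 m Y X)) := by
  obtain ⟨h1, h2⟩ := hm
  apply List.ext_getElem
  · simp [h1]
  · intro Y hY1 hY2
    simp only [List.getElem_map, List.getElem_range]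
    have hYd : Y < d := by omega
    have hrow : (m.getD Y []).length = d := h2 Y hYd
    have hgd : m.getD Y [] = m[Y] := List.getD_eq_getElem m [] hY1
    apply List.ext_getElem
    · rw [← hgd, hrow]; simp
    · intro X hX1 hX2
      simp only [List.getElem_map, List.getElem_range]
      rw [pvG2, hgd, List.getD_eq_getElem m[Y] 0 hX1]

theorem pvMain (grid : List (List String)) : get_adj_counts grid = get_adj_counts_alt grid := by
  have hshape : pvShp grid.length (get_adj_counts grid) := by
    rw [get_adj_counts, pvAdjInit, pvFold_eq_cells]
    exact pvShp_foldCells _ (pvShp_init grid.length)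
  conv_lhs => rw [pvTab hshape]
  rw [get_adj_counts_alt]
  apply List.map_congr_left
  intro Y hYm
  apply List.map_congr_left
  intro X hXm
  have hY : Y < grid.length := List.mem_range.1 hYm
  have hX : X < grid.length := List.mem_range.1 hXm
  dsimp only
  exact pvCell grid Y X hY hX

-- ===== VERDICT (by name: the statement is the Claim_ definition above) =====
theorem get_adj_counts_spec : Claim_equal_get_adj_counts := by
  intro grid _ _
  unfold Spec_get_adj_counts
  exact pvMain grid
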